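-- pv_equiv track=rewrite | github.com/oldarmyc/anchor | anchor/helper.py | format_volume_list_for_web
-- ===== SOURCE A (Python) =====
-- def format_volume_list_for_web(data):
--     send_data = {}
--     lookup = 'host'
--     for volume in data.get('volumes'):
--         temp = volume.get(lookup)
--         if not temp:
--             temp = 'unknown'
--         try:
--             send_data[temp].append(volume)
--         except:
--             send_data[temp] = [volume]
--
--     return send_data
-- ===== SOURCE B (Python) =====
-- def format_volume_list_for_web(data):
--     def key_of(v):
--         return v.get('host') or 'unknown'
--
--     send_data = {}
--     pending = data['volumes']
--     while pending:
--         k = key_of(pending[0])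
--         send_data[k] = [v for v in pending if key_of(v) == k]
--         pending = [v for v in pending if key_of(v) != k]
--     return send_data
-- ===== Notes on version B (the rewrite author's own statement) =====
-- stated objective: alternative
-- what changed: Replaces the one-pass try/except dict accumulation with a repeated-partition loop: take the first remaining volume's host key, emit that whole group by filtering, and recurse on the remaining volumes with other keys; no dict lookups during accumulation.
import Mathlib
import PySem

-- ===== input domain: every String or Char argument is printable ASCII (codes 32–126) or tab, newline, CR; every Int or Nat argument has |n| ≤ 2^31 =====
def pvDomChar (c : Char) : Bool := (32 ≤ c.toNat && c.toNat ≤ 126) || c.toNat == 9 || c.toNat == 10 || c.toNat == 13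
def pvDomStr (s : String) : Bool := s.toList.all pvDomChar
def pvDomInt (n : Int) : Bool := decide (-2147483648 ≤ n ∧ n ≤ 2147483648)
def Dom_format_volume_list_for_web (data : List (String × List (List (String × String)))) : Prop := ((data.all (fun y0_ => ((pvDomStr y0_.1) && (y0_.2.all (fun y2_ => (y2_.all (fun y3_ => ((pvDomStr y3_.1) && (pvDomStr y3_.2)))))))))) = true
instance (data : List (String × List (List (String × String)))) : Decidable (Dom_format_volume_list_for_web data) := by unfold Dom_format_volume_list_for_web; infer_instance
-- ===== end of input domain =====

-- B replaces A's one-pass try/except dict accumulation with a repeated-partition loop: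
-- take the first remaining volume's key, emit its whole group by filtering, and continue
-- on the volumes with other keys; same result, alternative structure (no dict during the loop).

-- ===== PORT A =====
-- temp = volume.get('host'); if not temp: temp = 'unknown'   (falsy = missing key or empty string)
def fvTempA (volume : List (String × String)) : String :=
  match (PySem.Dict.mk volume).get? "host" with
  | none => "unknown"
  | some s => if s == "" then "unknown" else s

-- try: send_data[temp].append(volume) / except: send_data[temp] = [volume]  is exactly
-- send_data[temp] = send_data.get(temp, []) + [volume]  → PySem.Dict.modify
def format_volume_list_for_web (data : List (String × List (List (String × String)))) : List (String × List (List (String × String))) :=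
  match (PySem.Dict.mk data).get? "volumes" with
  | none => []      -- Python raises TypeError here (iterating None); excluded by Pre_
  | some vols =>
      (vols.foldl (fun sd volume => sd.modify (fvTempA volume) [] (· ++ [volume])) PySem.Dict.empty).items

-- ===== PORT B =====
-- key_of(v) = v.get('host') or 'unknown'
def fvKeyB (volume : List (String × String)) : String :=
  let t := ((PySem.Dict.mk volume).get? "host").getD ""
  if t == "" then "unknown" else t

-- the 'while pending:' partition loop of Source B (terminates: the head's group is removed each round)
def fvGroup (pending : List (List (String × String))) : List (String × List (List (String × String))) :=
  match pending with
  | [] => []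
  | v :: vs =>
      (fvKeyB v, (v :: vs).filter (fun x => fvKeyB x == fvKeyB v)) ::
        fvGroup ((v :: vs).filter (fun x => fvKeyB x != fvKeyB v))
termination_by pending.length
decreasing_by
  simp only [List.filter_cons, bne_self_eq_false]
  exact Nat.lt_succ_of_le (List.length_filter_le _ _)

def format_volume_list_for_web_alt (data : List (String × List (List (String × String)))) : List (String × List (List (String × String))) :=
  match (PySem.Dict.mk data).get? "volumes" with
  | none => []      -- Python raises KeyError here; excluded by Pre_
  | some vols => fvGroup vols

-- ===== PRECONDITION & SPEC =====
-- Pre_ excludes exactly the inputs without a 'volumes' key, where Python A raises TypeError (iterating None).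
def Pre_format_volume_list_for_web (data : List (String × List (List (String × String)))) : Prop :=
  "volumes" ∈ data.map (·.1)
instance (data : List (String × List (List (String × String)))) : Decidable (Pre_format_volume_list_for_web data) := by unfold Pre_format_volume_list_for_web; infer_instance

def pvWitness_format_volume_list_for_web : (List (String × List (List (String × String)))) :=
  [("volumes", [[("host", "h1"), ("id", "1")], [("id", "2")], [("host", "h1")]])]

def Spec_format_volume_list_for_web (data : List (String × List (List (String × String)))) (out : List (String × List (List (String × String)))) : Prop := out = format_volume_list_for_web_alt data
instance (data : List (String × List (List (String × String)))) (out : List (String × List (List (String × String)))) : Decidable (Spec_format_volume_list_for_web data out) := by unfold Spec_format_volume_list_for_web; infer_instance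

-- ===== CLAIM (what is proved, stated in full; the proofs are below) =====
def Claim_equal_format_volume_list_for_web : Prop := ∀ (data : List (String × List (List (String × String)))), Dom_format_volume_list_for_web data → Pre_format_volume_list_for_web data → Spec_format_volume_list_for_web data (format_volume_list_for_web data)

-- ===== LEMMAS AND PROOFS =====

-- the two key extractors agree
theorem fvTempA_eq_fvKeyB (volume : List (String × String)) : fvTempA volume = fvKeyB volume := by
  unfold fvTempA fvKeyB
  cases (PySem.Dict.mk volume).get? "host" <;> simp

-- adding an element already present leaves a PySem.Set unchanged
theorem set_add_of_mem {α : Type} [DecidableEq α] (s : List α) (x : α) (h : x ∈ s) :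
    PySem.Set.add s x = s := by
  simp [PySem.Set.add, h]

-- once x is in the accumulator, dropping the x's from the input does not change the fold
theorem foldl_add_filter {α : Type} [DecidableEq α] (x : α) (l s : List α) (h : x ∈ s) :
    (l.filter (· != x)).foldl PySem.Set.add s = l.foldl PySem.Set.add s := by
  induction l generalizing s with
  | nil => rfl
  | cons a l ih =>
      by_cases hax : a = x
      · subst hax
        simp only [List.filter_cons, bne_self_eq_false, List.foldl_cons,
          set_add_of_mem s a h]
        exact ih s h
      · simp only [List.filter_cons, List.foldl_cons]
        have : (a != x) = true := by simp [hax]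
        rw [this]
        
        exact ih _ (by simp [PySem.Set.mem_add]; left; exact h)

-- a head element no later element equals can be peeled off the fold
theorem foldl_add_cons {α : Type} [DecidableEq α] (x : α) (l s : List α)
    (h : ∀ y ∈ l, y ≠ x) :
    l.foldl PySem.Set.add (x :: s) = x :: l.foldl PySem.Set.add s := by
  induction l generalizing s with
  | nil => rfl
  | cons a l ih =>
      have hax : a ≠ x := h a (by simp)
      have hadd : PySem.Set.add (x :: s) a = x :: PySem.Set.add s a := by
        simp [PySem.Set.add, hax]
        by_cases hs : a ∈ s <;> simp [hs]
      simp only [List.foldl_cons, hadd]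
      exact ih _ (fun y hy => h y (by simp [hy]))

-- dedup drops all later occurrences of the head
theorem dedup_cons_filter {α : Type} [DecidableEq α] (x : α) (l : List α) :
    PySem.List.dedup (x :: l) = x :: PySem.List.dedup (l.filter (· != x)) := by
  show PySem.Set.ofList (x :: l) = x :: PySem.Set.ofList (l.filter (· != x))
  rw [PySem.Set.ofList_eq_foldl, PySem.Set.ofList_eq_foldl]
  simp only [List.foldl_cons]
  have h0 : PySem.Set.add ([] : List α) x = [x] := rfl
  rw [h0, ← foldl_add_filter x l [x] (by simp)]
  exact foldl_add_cons x _ [] (fun y hy => by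
    have := List.of_mem_filter hy; simpa using this)

-- mapping the key through a key-filter is filtering the mapped keys
theorem map_key_filter (k : String) (l : List (List (String × String))) :
    (l.filter (fun x => fvKeyB x != k)).map fvKeyB = (l.map fvKeyB).filter (· != k) := by
  induction l with
  | nil => rfl
  | cons a l ih =>
      simp only [List.map_cons, List.filter_cons]
      by_cases h : fvKeyB a = k <;> simp [h, ih]

-- the partition loop computes the dedup-then-filter normal form
theorem fvGroup_eq (vols : List (List (String × String))) :
    fvGroup vols = (PySem.List.dedup (vols.map fvKeyB)).map
        (fun k => (k, vols.filter (fun v => fvKeyB v == k))) := by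
  induction vols using fvGroup.induct with
  | case1 => rw [fvGroup]; rfl
  | case2 v vs ih =>
      rw [fvGroup]
      set k := fvKeyB v with hk
      have hmapcons : (v :: vs).map fvKeyB = k :: vs.map fvKeyB := rfl
      rw [hmapcons, dedup_cons_filter, List.map_cons]
      refine congrArg _ ?_
      rw [ih]
      have hfc : (v :: vs).filter (fun x => fvKeyB x != k) = vs.filter (fun x => fvKeyB x != k) := by
        simp [← hk]
      rw [hfc, map_key_filter]
      refine List.map_congr_left (fun k' hk' => ?_)
      have hne : k' ≠ k := by
        have h1 : k' ∈ (vs.map fvKeyB).filter (· != k) := by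
          simpa [PySem.List.dedup_eq_ofList, PySem.Set.mem_ofList] using hk'
        have := List.of_mem_filter h1
        simpa using this
      refine congrArg _ ?_
      have hhead : (v :: vs).filter (fun v' => fvKeyB v' == k') = vs.filter (fun v' => fvKeyB v' == k') := by
        simp [← hk, Ne.symm hne]
      rw [hhead, List.filter_filter]
      refine (List.filter_congr (fun a _ => ?_)).symm
      by_cases ha : fvKeyB a = k' <;> simp [ha, hne]

-- A's accumulation loop produces exactly the same normal form
theorem fold_items_eq (vols : List (List (String × String))) :
    (vols.foldl (fun sd volume => sd.modify (fvKeyB volume) [] (· ++ [volume])) PySem.Dict.empty).items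
      = (PySem.List.dedup (vols.map fvKeyB)).map
          (fun k => (k, vols.filter (fun v => fvKeyB v == k))) := by
  set d := vols.foldl (fun sd volume => sd.modify (fvKeyB volume) [] (· ++ [volume])) PySem.Dict.empty with hd
  have hnd : d.keys.Nodup := by
    rw [hd]
    exact PySem.Dict.nodup_keys_foldl_modify_key vols fvKeyB [] (fun sd v => (· ++ [v])) _ PySem.Dict.nodup_keys_empty
  have hkeys : d.keys = PySem.List.dedup (vols.map fvKeyB) := by
    rw [hd, PySem.Dict.keys_foldl_modify_key]
    simp [PySem.Set.update_nil_left]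
  have hget : ∀ k, d.getD k [] = vols.filter (fun v => fvKeyB v == k) := by
    intro k
    have hmap : d = (vols.map (fun v => (fvKeyB v, v))).foldl
        (fun sd p => sd.modify p.1 [] (· ++ [p.2])) PySem.Dict.empty := by
      rw [hd, List.foldl_map]
    rw [hmap, PySem.Dict.getD_foldl_modify_append]
    simp [List.filter_map, Function.comp_def]
  rw [PySem.Dict.items_eq_map_keys d hnd [], hkeys]
  exact List.map_congr_left (fun k _ => by rw [hget k])

-- ===== VERDICT (by name: the statement is the Claim_ definition above) =====
theorem format_volume_list_for_web_spec : Claim_equal_format_volume_list_for_web := by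
  intro data _ _
  unfold Spec_format_volume_list_for_web format_volume_list_for_web format_volume_list_for_web_alt
  cases (PySem.Dict.mk data).get? "volumes" with
  | none => rfl
  | some vols =>
      simp only [funext fvTempA_eq_fvKeyB]
      rw [fold_items_eq vols, fvGroup_eq vols]
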